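-- pv_equiv track=rewrite | github.com/pypi-data/pypi-mirror-395 | packages/veox/veox-0.1.11.tar.gz/veox-0.1.11/src/veox/event_processor.py | _eval_mode
-- ===== SOURCE A (Python) =====
-- from typing import Dict, Any, List, Optional
--
-- def _eval_mode(ev: Dict[str, Any]) -> str:
--     """Determine evaluation mode from event."""
--     fp = ev.get("fitness_policy") or {}
--     if isinstance(fp, dict) and fp.get("domain") in {"kfold", "holdout", "simple"}:
--         return fp["domain"]
--
--     m = ev.get("metrics") or {}
--     # Check for aggregated metrics (CV results)
--     if any(k for k in m.keys() if any(k.endswith(suffix) for suffix in ("_mean", "_median", "_std", "_var"))):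
--         return "kfold"
--     # Check for holdout metrics
--     if any(k for k in m.keys() if k.startswith(("holdout_", "fold_4_"))):
--         return "holdout"
--     # Check for simple single metrics
--     if any(k for k in ["auc", "accuracy", "f1", "r2"] if k in m):
--         return "simple"
--     return "unknown"
-- ===== SOURCE B (Python) =====
-- def _rank(k):
--     # priority class of one metric key: 0 = aggregated, 1 = holdout, 2 = simple, 3 = none
--     if k.endswith(("_mean", "_median", "_std", "_var")):
--         return 0
--     if k.startswith(("holdout_", "fold_4_")):
--         return 1
--     if k in ("auc", "accuracy", "f1", "r2"):
--         return 2
--     return 3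
--
-- def _eval_mode(ev):
--     fp = ev.get("fitness_policy") or {}
--     if isinstance(fp, dict) and fp.get("domain") in {"kfold", "holdout", "simple"}:
--         return fp["domain"]
--     m = ev.get("metrics") or {}
--     # Rank each key once, reduce by min, and map the best rank through a table.
--     return ("kfold", "holdout", "simple", "unknown")[min(map(_rank, m), default=3)]
-- ===== Notes on version B (the rewrite author's own statement) =====
-- stated objective: alternative
-- what changed: The three ordered any() scans over the metric keys are replaced by a numeric rank classification of each key (0=aggregated, 1=holdout, 2=simple, 3=none), a min-reduction over those ranks, and a table lookup turning the best rank into the mode string; the fitness_policy guard is kept.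
import Mathlib
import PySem

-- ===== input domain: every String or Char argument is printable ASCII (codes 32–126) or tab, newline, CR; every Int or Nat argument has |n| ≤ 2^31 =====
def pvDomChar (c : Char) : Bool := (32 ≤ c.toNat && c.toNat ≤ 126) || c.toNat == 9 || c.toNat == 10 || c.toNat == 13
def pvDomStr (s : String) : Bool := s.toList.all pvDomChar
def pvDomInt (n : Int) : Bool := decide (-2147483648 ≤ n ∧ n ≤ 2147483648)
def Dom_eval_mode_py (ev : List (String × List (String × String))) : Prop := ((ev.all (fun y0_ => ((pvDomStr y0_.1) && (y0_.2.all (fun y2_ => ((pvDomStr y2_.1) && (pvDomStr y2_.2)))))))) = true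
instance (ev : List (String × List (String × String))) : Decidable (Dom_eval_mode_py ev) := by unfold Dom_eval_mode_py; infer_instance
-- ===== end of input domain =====

-- B replaces A's three ordered any() scans by a per-key rank classification,
-- a min-reduction over the ranks, and a table lookup (objective: alternative).

-- dict lookup = first match in the association list (Python dict.get)
def pvLook {α : Type} (l : List (String × α)) (k : String) : Option α :=
  (l.find? (fun p => p.1 == k)).map (·.2)

-- ===== PORT A =====
-- A's metric-key phase: three any(...) generator scans in priority order.
-- 'any(k for k in m.keys() if cond)' tests the truthiness of the surviving key k,
-- ported literally as 'cond k && !(k == "")'.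
def pvAMetrics (ev : List (String × List (String × String))) : String :=
  let m := (pvLook ev "metrics").getD []
  let keys := m.map (·.1)
  if keys.any (fun k => (PySem.Str.endswith k "_mean" || PySem.Str.endswith k "_median" ||
      PySem.Str.endswith k "_std" || PySem.Str.endswith k "_var") && !(k == "")) then "kfold"
  else if keys.any (fun k => (PySem.Str.startswith k "holdout_" || PySem.Str.startswith k "fold_4_") && !(k == "")) then "holdout"
  else if (["auc", "accuracy", "f1", "r2"]).any (fun k => keys.contains k && !(k == "")) then "simple"
  else "unknown"

def eval_mode_py (ev : List (String × List (String × String))) : String :=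
  let fp := (pvLook ev "fitness_policy").getD []
  match pvLook fp "domain" with
  | some d => if d == "kfold" || d == "holdout" || d == "simple" then d else pvAMetrics ev
  | none => pvAMetrics ev

-- ===== PORT B =====
-- priority class of one metric key: 0 = aggregated, 1 = holdout, 2 = simple, 3 = none
def pvRank (k : String) : Nat :=
  if PySem.Str.endswith k "_mean" || PySem.Str.endswith k "_median" ||
      PySem.Str.endswith k "_std" || PySem.Str.endswith k "_var" then 0
  else if PySem.Str.startswith k "holdout_" || PySem.Str.startswith k "fold_4_" then 1
  else if k == "auc" || k == "accuracy" || k == "f1" || k == "r2" then 2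
  else 3

-- B's metric-key phase: min-reduction over the ranks, then a table lookup.
def pvBMetrics (ev : List (String × List (String × String))) : String :=
  let m := (pvLook ev "metrics").getD []
  let r := m.foldl (fun a p => min a (pvRank p.1)) 3
  (["kfold", "holdout", "simple", "unknown"]).getD r "unknown"

def eval_mode_py_alt (ev : List (String × List (String × String))) : String :=
  let fp := (pvLook ev "fitness_policy").getD []
  match pvLook fp "domain" with
  | some d => if d == "kfold" || d == "holdout" || d == "simple" then d else pvBMetrics ev
  | none => pvBMetrics ev

-- ===== PRECONDITION & SPEC =====
def Spec_eval_mode_py (ev : List (String × List (String × String))) (out : String) : Prop := out = eval_mode_py_alt ev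
instance (ev : List (String × List (String × String))) (out : String) : Decidable (Spec_eval_mode_py ev out) := by unfold Spec_eval_mode_py; infer_instance

-- ===== CLAIM (what is proved, stated in full; the proofs are below) =====
def Claim_equal_eval_mode_py : Prop := ∀ (ev : List (String × List (String × String))), Dom_eval_mode_py ev → Spec_eval_mode_py ev (eval_mode_py ev)

-- ===== LEMMAS AND PROOFS =====

def pvIsAgg (k : String) : Bool :=
  PySem.Str.endswith k "_mean" || PySem.Str.endswith k "_median" ||
  PySem.Str.endswith k "_std" || PySem.Str.endswith k "_var"

def pvIsHold (k : String) : Bool :=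
  PySem.Str.startswith k "holdout_" || PySem.Str.startswith k "fold_4_"

def pvIsSimple (k : String) : Bool :=
  k == "auc" || k == "accuracy" || k == "f1" || k == "r2"

-- the minimum rank of a list of keys, recursively
def pvMinRank : List String → Nat
  | [] => 3
  | k :: t => min (pvRank k) (pvMinRank t)

-- the fold in pvBMetrics computes min a (pvMinRank keys)
theorem pv_fold_min (l : List (String × String)) (a : Nat) (ha : a ≤ 3) :
    l.foldl (fun b p => min b (pvRank p.1)) a = min a (pvMinRank (l.map (·.1))) := by
  induction l generalizing a with
  | nil => simp [pvMinRank, ha]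
  | cons p l ih =>
    rw [List.foldl_cons, ih (min a (pvRank p.1)) (le_trans (Nat.min_le_left _ _) ha)]
    simp [pvMinRank, Nat.min_assoc]

-- the minimum rank equals the ordered decision over the three any-scans
theorem pv_minRank_eq (keys : List String) :
    pvMinRank keys =
      (if keys.any pvIsAgg then 0 else if keys.any pvIsHold then 1
        else if keys.any pvIsSimple then 2 else 3) := by
  induction keys with
  | nil => simp [pvMinRank]
  | cons k t ih =>
    simp only [pvMinRank, ih, pvRank, List.any_cons]
    by_cases ha : pvIsAgg k <;> by_cases hh : pvIsHold k <;> by_cases hs : pvIsSimple k <;>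
      simp [pvIsAgg, pvIsHold, pvIsSimple] at ha hh hs <;>
      simp [ha, hh, hs, pvIsAgg, pvIsHold, pvIsSimple] <;>
      split_ifs <;> omega

-- the truthiness guard is redundant: "" matches none of the conditions
theorem pv_agg_guard (k : String) : (pvIsAgg k && !(k == "")) = pvIsAgg k := by
  by_cases h : k = ""
  · subst h; decide
  · simp [h]

theorem pv_hold_guard (k : String) : (pvIsHold k && !(k == "")) = pvIsHold k := by
  by_cases h : k = ""
  · subst h; decide
  · simp [h]

-- scanning the four literals for membership in keys = scanning keys for pvIsSimple
theorem pv_simple_swap (keys : List String) :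
    (["auc", "accuracy", "f1", "r2"]).any (fun k => keys.contains k && !(k == "")) =
      keys.any pvIsSimple := by
  rw [Bool.eq_iff_iff]
  simp [pvIsSimple, List.any_eq_true]
  constructor
  · rintro (h | h | h | h) <;> exact ⟨_, h, by simp⟩
  · rintro ⟨x, hx, ((h | h) | h) | h⟩ <;> subst h <;> simp [hx]

-- the two metric-key phases agree
theorem pv_phase_eq (m : List (String × String)) :
    (if (m.map (·.1)).any (fun k => (PySem.Str.endswith k "_mean" || PySem.Str.endswith k "_median" ||
        PySem.Str.endswith k "_std" || PySem.Str.endswith k "_var") && !(k == "")) then ("kfold" : String)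
      else if (m.map (·.1)).any (fun k => (PySem.Str.startswith k "holdout_" || PySem.Str.startswith k "fold_4_") && !(k == "")) then "holdout"
      else if (["auc", "accuracy", "f1", "r2"]).any (fun k => (m.map (·.1)).contains k && !(k == "")) then "simple"
      else "unknown") =
    (["kfold", "holdout", "simple", "unknown"]).getD (m.foldl (fun a p => min a (pvRank p.1)) 3) "unknown" := by
  rw [pv_fold_min m 3 (le_refl 3), pv_minRank_eq]
  simp only [show (fun k => (PySem.Str.endswith k "_mean" || PySem.Str.endswith k "_median" ||
      PySem.Str.endswith k "_std" || PySem.Str.endswith k "_var") && !(k == "")) =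
      (fun k => pvIsAgg k && !(k == "")) from rfl,
    show (fun k => (PySem.Str.startswith k "holdout_" || PySem.Str.startswith k "fold_4_") && !(k == "")) =
      (fun k => pvIsHold k && !(k == "")) from rfl,
    pv_agg_guard, pv_hold_guard, pv_simple_swap]
  split_ifs <;> rfl

theorem pv_metrics_eq (ev : List (String × List (String × String))) :
    pvAMetrics ev = pvBMetrics ev :=
  pv_phase_eq ((pvLook ev "metrics").getD [])

-- both tops branch identically on the fitness_policy domain
theorem pv_top (o : Option String) (x y : String) (hxy : x = y) :
    (match o with
      | some d => if d == "kfold" || d == "holdout" || d == "simple" then d else x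
      | none => x) =
    (match o with
      | some d => if d == "kfold" || d == "holdout" || d == "simple" then d else y
      | none => y) := by
  rw [hxy]

-- ===== VERDICT (by name: the statement is the Claim_ definition above) =====
theorem eval_mode_py_spec : Claim_equal_eval_mode_py := by
  intro ev _
  exact pv_top (pvLook ((pvLook ev "fitness_policy").getD []) "domain") _ _ (pv_metrics_eq ev)
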